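-- pv_equiv track=rewrite | github.com/AshishKakran/90day-coding-streak-challenge | day45_beautifulTriplets.py | beautifulTriplets
-- ===== SOURCE A (Python) =====
-- def beautifulTriplets(d, arr):
--     # Write your code here
--
--     count = 0
--
--     if len(arr) < 3:
--         return 0
--
--
--     good_pairs = []
--
--     for j in range(1, len(arr) - 1):
--         for i in range(0, j):
--             if arr[j] - arr[i] == d:
--                 good_pairs.append(j)
--
--     for j in good_pairs:
--         for k in range(j+1, len(arr)):
--             if arr[k] - arr[j] == d:
--                 count += 1
--
--
--
--     return count
-- ===== SOURCE B (Python) =====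
-- def beautifulTriplets(d, arr):
--     # one pass: for each middle element x, multiply how many (x-d) lie to the
--     # left by how many (x+d) lie to the right, using two value->count dicts
--     right = {}
--     for x in arr:
--         right[x] = right.get(x, 0) + 1
--     left = {}
--     count = 0
--     for x in arr:
--         right[x] = right.get(x, 0) - 1
--         count += left.get(x - d, 0) * right.get(x + d, 0)
--         left[x] = left.get(x, 0) + 1
--     return count
-- ===== Notes on version B (the rewrite author's own statement) =====
-- stated objective: faster
-- what changed: Replaced A's two quadratic index scans (building a multiset of middle indices, then rescanning the suffix for each) by one linear pass that, for each element x, multiplies the count of x-d seen so far (prefix dict) by the count of x+d still ahead (suffix dict).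
import Mathlib
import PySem

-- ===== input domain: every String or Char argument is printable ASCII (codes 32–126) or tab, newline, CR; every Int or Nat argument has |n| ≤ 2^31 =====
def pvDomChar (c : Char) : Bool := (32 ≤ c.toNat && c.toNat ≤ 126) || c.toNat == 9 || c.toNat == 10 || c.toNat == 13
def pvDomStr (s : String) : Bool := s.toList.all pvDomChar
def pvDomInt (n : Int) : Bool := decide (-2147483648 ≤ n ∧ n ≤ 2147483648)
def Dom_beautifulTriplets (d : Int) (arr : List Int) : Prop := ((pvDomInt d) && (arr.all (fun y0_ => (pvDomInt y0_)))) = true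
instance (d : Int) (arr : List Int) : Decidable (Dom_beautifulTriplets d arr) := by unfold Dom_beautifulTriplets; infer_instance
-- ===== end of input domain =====

-- B replaces A's two quadratic index scans with one linear pass over prefix/suffix value counters (asymptotically faster); return values agree everywhere.

-- ===== PORT A =====
def beautifulTriplets (d : Int) (arr : List Int) : Int :=
  if arr.length < 3 then 0
  else
    let good_pairs : List Int :=
      (PySem.List.pyRange 1 ((arr.length : Int) - 1) 1).foldl (fun gp j =>
        (PySem.List.pyRange 0 j 1).foldl (fun gp i =>
          if PySem.List.pyGetD arr j 0 - PySem.List.pyGetD arr i 0 = d then gp ++ [j] else gp) gp) []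
    good_pairs.foldl (fun count j =>
      (PySem.List.pyRange (j + 1) (arr.length : Int) 1).foldl (fun count k =>
        if PySem.List.pyGetD arr k 0 - PySem.List.pyGetD arr j 0 = d then count + 1 else count) count) 0

-- ===== PORT B =====
def beautifulTriplets_alt (d : Int) (arr : List Int) : Int :=
  let right := arr.foldl (fun r x => r.insert x (r.getD x 0 + 1)) PySem.Dict.empty
  let res := arr.foldl (fun st x =>
      let r' := st.2.1.modify x 0 (· - 1)
      (st.1.modify x 0 (· + 1), r', st.2.2 + st.1.getD (x - d) 0 * r'.getD (x + d) 0))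
    ((PySem.Dict.empty : PySem.Dict Int Int), right, (0 : Int))
  res.2.2

-- ===== PRECONDITION & SPEC =====
def Spec_beautifulTriplets (d : Int) (arr : List Int) (out : Int) : Prop := out = beautifulTriplets_alt d arr
instance (d : Int) (arr : List Int) (out : Int) : Decidable (Spec_beautifulTriplets d arr out) := by unfold Spec_beautifulTriplets; infer_instance

-- ===== CLAIM (what is proved, stated in full; the proofs are below) =====
def Claim_equal_beautifulTriplets : Prop := ∀ (d : Int) (arr : List Int), Dom_beautifulTriplets d arr → Spec_beautifulTriplets d arr (beautifulTriplets d arr)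

-- ===== LEMMAS AND PROOFS =====

/-- Reference count: sum over middle positions of (#matching left)·(#matching right). -/
def tripCount (d : Int) : List Int → List Int → Int
  | _, [] => 0
  | pre, x :: s => (pre.count (x - d) : Int) * (s.count (x + d) : Int) + tripCount d (pre ++ [x]) s

/-- the per-middle-index term, over the full array -/
def Fterm (d : Int) (full : List Int) (j : Int) : Int :=
  ((full.take j.toNat).count (PySem.List.pyGetD full j 0 - d) : Int) *
  ((full.drop (j.toNat + 1)).count (PySem.List.pyGetD full j 0 + d) : Int)

lemma map_pyGetD_range_take (arr : List Int) (j : Int) (h0 : 0 ≤ j) (hj : j ≤ (arr.length : Int)) :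
    (PySem.List.pyRange 0 j 1).map (fun i => PySem.List.pyGetD arr i 0) = arr.take j.toNat := by
  have hsplit := PySem.List.pyRange_one_append 0 j (arr.length : Int) h0 hj
  have hfull : (PySem.List.pyRange 0 (arr.length : Int) 1).map (fun i => PySem.List.pyGetD arr i 0) = arr :=
    PySem.List.map_pyGetD_pyRange_zero arr 0
  have hdrop : (PySem.List.pyRange j (arr.length : Int) 1).map (fun i => PySem.List.pyGetD arr i 0) = arr.drop j.toNat :=
    PySem.List.map_pyGetD_pyRange arr 0 h0
  have h1 : (PySem.List.pyRange 0 j 1).map (fun i => PySem.List.pyGetD arr i 0) ++ arr.drop j.toNat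
      = arr := by
    rw [← hdrop, ← List.map_append, ← hsplit, hfull]
  exact List.append_cancel_right (h1.trans (List.take_append_drop j.toNat arr).symm)

lemma b_inv (d : Int) : ∀ (suf pre : List Int) (l r : PySem.Dict Int Int) (c : Int),
    (∀ v, l.getD v 0 = (pre.count v : Int)) → (∀ v, r.getD v 0 = (suf.count v : Int)) →
    (suf.foldl (fun st x =>
      let r' := st.2.1.modify x 0 (· - 1)
      (st.1.modify x 0 (· + 1), r', st.2.2 + st.1.getD (x - d) 0 * r'.getD (x + d) 0)) (l, r, c)).2.2
    = c + tripCount d pre suf := by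
  intro suf
  induction suf with
  | nil => intro pre l r c _ _; simp [tripCount]
  | cons x s ih =>
    intro pre l r c hl hr
    have hr' : ∀ v, (r.modify x 0 (· - 1)).getD v 0 = (s.count v : Int) := by
      intro v
      rw [PySem.Dict.getD_modify]
      by_cases hv : v = x
      · rw [if_pos hv, hr x, hv]
        simp [List.count_cons]
      · rw [if_neg hv, hr v]
        simp only [List.count_cons]
        have hne : x ≠ v := fun h => hv h.symm
        simp [List.count_cons, hne]
    have hl' : ∀ v, (l.modify x 0 (· + 1)).getD v 0 = ((pre ++ [x]).count v : Int) := by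
      intro v
      rw [PySem.Dict.getD_modify]
      by_cases hv : v = x
      · rw [if_pos hv, hl x, hv]
        simp [List.count_append]
      · rw [if_neg hv, hl v]
        have hne : x ≠ v := fun h => hv h.symm
        simp [List.count_append, List.count_singleton, hne]
    simp only [List.foldl_cons]
    rw [ih (pre ++ [x]) _ _ _ hl' hr']
    rw [tripCount, hl (x - d), hr' (x + d)]
    ring

lemma alt_eq_tripCount (d : Int) (arr : List Int) :
    beautifulTriplets_alt d arr = tripCount d [] arr := by
  unfold beautifulTriplets_alt
  rw [PySem.Dict.foldl_insert_getD_add_one_eq_counter]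
  rw [b_inv d arr [] PySem.Dict.empty (PySem.Dict.counter arr) 0
      (fun v => by simp [PySem.Dict.getD_empty])
      (fun v => PySem.Dict.getD_counter arr v)]
  ring

lemma tripCount_short (d : Int) (arr : List Int) (h : arr.length < 3) :
    tripCount d [] arr = 0 := by
  match arr, h with
  | [], _ => simp [tripCount]
  | [a], _ => simp [tripCount]
  | [a, b], _ => simp [tripCount]

lemma sum_eq_tripCount (d : Int) : ∀ (suf pre : List Int),
    ((PySem.List.pyRange (pre.length : Int) ((pre.length + suf.length : Nat) : Int) 1).map
      (Fterm d (pre ++ suf))).sum = tripCount d pre suf := by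
  intro suf
  induction suf with
  | nil =>
    intro pre
    rw [PySem.List.pyRange_one_eq_nil (by simp)]
    simp [tripCount]
  | cons x s ih =>
    intro pre
    have hlt : (pre.length : Int) < ((pre.length + (x :: s).length : Nat) : Int) := by
      simp only [List.length_cons]; push_cast; omega
    rw [PySem.List.pyRange_one_cons hlt]
    simp only [List.map_cons, List.sum_cons]
    have hhead : Fterm d (pre ++ x :: s) (pre.length : Int) =
        (pre.count (x - d) : Int) * (s.count (x + d) : Int) := by
      unfold Fterm
      have hget : PySem.List.pyGetD (pre ++ x :: s) (pre.length : Int) 0 = x := by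
        rw [PySem.List.pyGetD_natCast]
        rw [List.getD_eq_getElem _ _ (by simp)]
        simp
      have htake : (pre ++ x :: s).take ((pre.length : Int)).toNat = pre := by
        simp
      have hdrop : (pre ++ x :: s).drop (((pre.length : Int)).toNat + 1) = s := by
        have : pre ++ x :: s = (pre ++ [x]) ++ s := by simp
        rw [this]
        have hlen : ((pre.length : Int)).toNat + 1 = (pre ++ [x]).length := by simp
        rw [hlen, List.drop_left]
      rw [hget, htake, hdrop]
    rw [hhead]
    have htail : ((PySem.List.pyRange ((pre.length : Int) + 1) ((pre.length + (x :: s).length : Nat) : Int) 1).map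
        (Fterm d (pre ++ x :: s))).sum = tripCount d (pre ++ [x]) s := by
      have h1 : pre ++ x :: s = (pre ++ [x]) ++ s := by simp
      have h2 : (pre.length : Int) + 1 = (((pre ++ [x]).length : Nat) : Int) := by simp
      have h3 : ((pre.length + (x :: s).length : Nat) : Int) = (((pre ++ [x]).length + s.length : Nat) : Int) := by
        simp; omega
      rw [h1, h2, h3, ih (pre ++ [x])]
    rw [htail, tripCount]

lemma sum_flatMap_int {α : Type} (l : List α) (f : α → List Int) :
    (l.flatMap f).sum = (l.map (fun x => (f x).sum)).sum := by
  induction l with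
  | nil => simp
  | cons x t ih => simp [ih]

lemma a_eq_sum (d : Int) (arr : List Int) (h : ¬ arr.length < 3) :
    beautifulTriplets d arr =
    ((PySem.List.pyRange 1 ((arr.length : Int) - 1) 1).map (Fterm d arr)).sum := by
  unfold beautifulTriplets
  rw [if_neg h]
  have hgp : (PySem.List.pyRange 1 ((arr.length : Int) - 1) 1).foldl (fun gp j =>
        (PySem.List.pyRange 0 j 1).foldl (fun gp i =>
          if PySem.List.pyGetD arr j 0 - PySem.List.pyGetD arr i 0 = d then gp ++ [j] else gp) gp) []
      = (PySem.List.pyRange 1 ((arr.length : Int) - 1) 1).flatMap (fun j =>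
          ((PySem.List.pyRange 0 j 1).filter
            (fun i => decide (PySem.List.pyGetD arr j 0 - PySem.List.pyGetD arr i 0 = d))).map (fun _ => j)) := by
    have hcg : ∀ (acc : List Int) (j : Int), j ∈ PySem.List.pyRange 1 ((arr.length : Int) - 1) 1 →
        (PySem.List.pyRange 0 j 1).foldl (fun gp i =>
          if PySem.List.pyGetD arr j 0 - PySem.List.pyGetD arr i 0 = d then gp ++ [j] else gp) acc
        = acc ++ ((PySem.List.pyRange 0 j 1).filter
            (fun i => decide (PySem.List.pyGetD arr j 0 - PySem.List.pyGetD arr i 0 = d))).map (fun _ => j) := by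
      intro acc j _
      exact PySem.List.foldl_append_ite _ _ _ _
    rw [PySem.List.foldl_congr_mem _ _ _ _ hcg]
    exact PySem.List.foldl_append_eq_flatMap _ _ _
  rw [hgp]
  have hcount : (((PySem.List.pyRange 1 ((arr.length : Int) - 1) 1).flatMap (fun j =>
      ((PySem.List.pyRange 0 j 1).filter
        (fun i => decide (PySem.List.pyGetD arr j 0 - PySem.List.pyGetD arr i 0 = d))).map (fun _ => j)))).foldl
      (fun count j =>
        (PySem.List.pyRange (j + 1) (arr.length : Int) 1).foldl (fun count k =>
          if PySem.List.pyGetD arr k 0 - PySem.List.pyGetD arr j 0 = d then count + 1 else count) count) 0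
      = (((PySem.List.pyRange 1 ((arr.length : Int) - 1) 1).flatMap (fun j =>
        ((PySem.List.pyRange 0 j 1).filter
          (fun i => decide (PySem.List.pyGetD arr j 0 - PySem.List.pyGetD arr i 0 = d))).map (fun _ => j))).map
        (fun j => ((PySem.List.pyRange (j + 1) (arr.length : Int) 1).countP
          (fun k => decide (PySem.List.pyGetD arr k 0 - PySem.List.pyGetD arr j 0 = d)) : Int))).sum := by
    have hcg : ∀ (acc : Int) (j : Int), j ∈ ((PySem.List.pyRange 1 ((arr.length : Int) - 1) 1).flatMap (fun j =>
      ((PySem.List.pyRange 0 j 1).filter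
        (fun i => decide (PySem.List.pyGetD arr j 0 - PySem.List.pyGetD arr i 0 = d))).map (fun _ => j))) →
        (PySem.List.pyRange (j + 1) (arr.length : Int) 1).foldl (fun count k =>
          if PySem.List.pyGetD arr k 0 - PySem.List.pyGetD arr j 0 = d then count + 1 else count) acc
        = acc + ((PySem.List.pyRange (j + 1) (arr.length : Int) 1).countP
          (fun k => decide (PySem.List.pyGetD arr k 0 - PySem.List.pyGetD arr j 0 = d)) : Int) := by
      intro acc j _
      exact PySem.List.foldl_ite_add_one _ _ _
    rw [PySem.List.foldl_congr_mem _ _ _ _ hcg]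
    rw [PySem.List.foldl_add]
    simp
  rw [hcount]
  rw [List.map_flatMap, sum_flatMap_int]
  congr 1
  apply List.map_congr_left
  intro j hj
  have hjb := (PySem.List.mem_pyRange_one.mp hj)
  have hj0 : 0 ≤ j := by omega
  have hjlen : j < (arr.length : Int) - 1 := hjb.2
  -- the inner list is a constant-j list; its mapped sum is (#filter) * term
  rw [List.map_map]
  have hconst : ((PySem.List.pyRange 0 j 1).filter
      (fun i => decide (PySem.List.pyGetD arr j 0 - PySem.List.pyGetD arr i 0 = d))).map
      ((fun j => ((PySem.List.pyRange (j + 1) (arr.length : Int) 1).countP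
        (fun k => decide (PySem.List.pyGetD arr k 0 - PySem.List.pyGetD arr j 0 = d)) : Int)) ∘ (fun _ => j))
      = List.replicate ((PySem.List.pyRange 0 j 1).countP
          (fun i => decide (PySem.List.pyGetD arr j 0 - PySem.List.pyGetD arr i 0 = d)))
        ((PySem.List.pyRange (j + 1) (arr.length : Int) 1).countP
          (fun k => decide (PySem.List.pyGetD arr k 0 - PySem.List.pyGetD arr j 0 = d)) : Int) := by
    rw [List.eq_replicate_iff]
    constructor
    · simp [List.countP_eq_length_filter]
    · intro b hb
      rcases List.mem_map.mp hb with ⟨i, _, hi⟩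
      exact hi.symm
  rw [hconst, List.sum_replicate, nsmul_eq_mul]
  -- now identify the two countP's with take/drop counts
  have hL : (PySem.List.pyRange 0 j 1).countP
      (fun i => decide (PySem.List.pyGetD arr j 0 - PySem.List.pyGetD arr i 0 = d))
      = (arr.take j.toNat).count (PySem.List.pyGetD arr j 0 - d) := by
    rw [← map_pyGetD_range_take arr j hj0 (by omega)]
    rw [List.count, List.countP_map]
    apply List.countP_congr
    intro i _
    have hiff : (PySem.List.pyGetD arr j 0 - PySem.List.pyGetD arr i 0 = d) ↔
        (PySem.List.pyGetD arr i 0 = PySem.List.pyGetD arr j 0 - d) := by omega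
    simp [Function.comp, hiff]
  have hmapR : (PySem.List.pyRange (j + 1) ((arr.length : Int)) 1).map (fun k => PySem.List.pyGetD arr k 0)
      = arr.drop (j + 1).toNat := PySem.List.map_pyGetD_pyRange arr 0 (by omega)
  have hR : (PySem.List.pyRange (j + 1) ((arr.length : Int)) 1).countP
      (fun k => decide (PySem.List.pyGetD arr k 0 - PySem.List.pyGetD arr j 0 = d))
      = (arr.drop (j + 1).toNat).count (PySem.List.pyGetD arr j 0 + d) := by
    rw [← hmapR, List.count, List.countP_map]
    apply List.countP_congr
    intro k _
    have hiff : (PySem.List.pyGetD arr k 0 - PySem.List.pyGetD arr j 0 = d) ↔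
        (PySem.List.pyGetD arr k 0 = PySem.List.pyGetD arr j 0 + d) := by omega
    simp [Function.comp, hiff]
  have htn : (j + 1).toNat = j.toNat + 1 := by omega
  rw [hL, hR, htn]
  unfold Fterm
  rfl

lemma a_eq_alt (d : Int) (arr : List Int) : beautifulTriplets d arr = beautifulTriplets_alt d arr := by
  rw [alt_eq_tripCount]
  by_cases h : arr.length < 3
  · rw [tripCount_short d arr h]
    unfold beautifulTriplets
    rw [if_pos h]
  · rw [a_eq_sum d arr h]
    have hsum := sum_eq_tripCount d arr []
    have hbase : ((PySem.List.pyRange 0 ((arr.length : Int)) 1).map (Fterm d arr)).sum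
        = tripCount d [] arr := by simpa using hsum
    have e0 : PySem.List.pyRange 0 ((arr.length : Int)) 1
        = 0 :: PySem.List.pyRange 1 ((arr.length : Int)) 1 := by
      have := PySem.List.pyRange_one_cons (a := 0) (b := ((arr.length : Int))) (by omega)
      simpa using this
    have e1 : PySem.List.pyRange 1 ((arr.length : Int)) 1
        = PySem.List.pyRange 1 ((arr.length : Int) - 1) 1 ++ [(arr.length : Int) - 1] := by
      have := PySem.List.pyRange_one_succ_right (a := 1) (b := (arr.length : Int) - 1) (by omega)
      simpa using this
    have hF0 : Fterm d arr 0 = 0 := by simp [Fterm]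
    have hFn : Fterm d arr ((arr.length : Int) - 1) = 0 := by
      unfold Fterm
      have hdrop : arr.drop (((arr.length : Int) - 1).toNat + 1) = [] := by
        apply List.drop_eq_nil_of_le
        omega
      rw [hdrop]
      simp
    rw [e0, e1] at hbase
    simp only [List.map_cons, List.map_append, List.sum_cons, List.sum_append, List.map_nil,
      List.sum_nil, hF0, hFn, List.map_cons, List.sum_cons] at hbase
    simpa using hbase

-- ===== VERDICT (by name: the statement is the Claim_ definition above) =====
theorem beautifulTriplets_spec : Claim_equal_beautifulTriplets := by
  intro d arr _
  unfold Spec_beautifulTriplets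
  exact a_eq_alt d arr
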